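-- pv_equiv track=rewrite | github.com/prateekaphale-12/AI-Investment-Platform | backend/app/agents/graph/nodes.py | _merge_summary_lines
-- ===== SOURCE A (Python) =====
-- def _merge_summary_lines(raw: str, tickers: list[str]) -> dict[str, str]:
--     """Parse 'TICKER: sentence' lines from model output."""
--     out: dict[str, str] = {t: "" for t in tickers}
--     for line in raw.splitlines():
--         line = line.strip()
--         if not line or ":" not in line:
--             continue
--         ticker, _, rest = line.partition(":")
--         t = ticker.strip().upper()
--         if t in out:
--             out[t] = rest.strip()
--     return out
-- ===== SOURCE B (Python) =====
-- def _merge_summary_lines(raw: str, tickers: list[str]) -> dict[str, str]: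
--     """Parse 'TICKER: sentence' lines from model output."""
--     pairs: list[tuple[str, str]] = []
--     for line in raw.splitlines():
--         line = line.strip()
--         if line and ":" in line:
--             ticker, _, rest = line.partition(":")
--             pairs.append((ticker.strip().upper(), rest.strip()))
--     pairs.reverse()
--     res: dict[str, str] = {}
--     for t in tickers:
--         res[t] = next((v for k, v in pairs if k == t), "")
--     return res
-- ===== Notes on version B (the rewrite author's own statement) =====
-- stated objective: alternative
-- what changed: B replaces A's pre-seeded dict with last-wins overwrite by tokenising all 'TICKER: rest' lines into a list, reversing it, and answering each requested ticker by a first-match linear search over the reversed list (first match in reverse order = A's last-wins).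
import Mathlib
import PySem

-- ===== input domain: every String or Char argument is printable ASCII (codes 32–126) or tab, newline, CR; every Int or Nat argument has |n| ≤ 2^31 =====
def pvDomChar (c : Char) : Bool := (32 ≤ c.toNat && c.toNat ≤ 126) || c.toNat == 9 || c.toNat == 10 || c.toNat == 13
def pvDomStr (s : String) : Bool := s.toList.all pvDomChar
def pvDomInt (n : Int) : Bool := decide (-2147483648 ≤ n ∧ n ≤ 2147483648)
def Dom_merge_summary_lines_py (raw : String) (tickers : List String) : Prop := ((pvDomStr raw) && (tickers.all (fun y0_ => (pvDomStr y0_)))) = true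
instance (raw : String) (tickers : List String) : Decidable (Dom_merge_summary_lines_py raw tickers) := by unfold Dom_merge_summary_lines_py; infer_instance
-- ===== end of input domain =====

-- B tokenises all 'TICKER: rest' lines into a list, reverses it, and answers each requested
-- ticker by a first-match search over the reversed list (first match in reverse = A's
-- last-wins dict overwrite); objective: alternative algorithm, return value proved equal to A's.

-- exact port of line.partition(":") restricted to its (head, rest) components,
-- used only after the code has checked ':' ∈ line (where it is exact)
def pyPartitionColon (line : String) : String × String :=
  (String.ofList (line.toList.takeWhile (· ≠ ':')),
   String.ofList ((line.toList.dropWhile (· ≠ ':')).drop 1))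

-- ===== PORT A =====
def mslA_step (out : PySem.Dict String String) (line0 : String) : PySem.Dict String String :=
  let line := PySem.Str.strip line0
  if (line == "") || !(PySem.Str.isIn ":" line) then out
  else
    let p := pyPartitionColon line
    let t := PySem.Str.upper (PySem.Str.strip p.1)
    if out.contains t then out.insert t (PySem.Str.strip p.2) else out

def merge_summary_lines_py (raw : String) (tickers : List String) : List (String × String) :=
  let out0 : PySem.Dict String String :=
    tickers.foldl (fun d t => d.insert t "") PySem.Dict.empty
  ((PySem.Str.splitlines raw).foldl mslA_step out0).items

-- ===== PORT B =====
-- tokenising loop of Source B: append (key, value) for every accepted line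
def mslB_parse (raw : String) : List (String × String) :=
  (PySem.Str.splitlines raw).foldl (fun acc line0 =>
    let line := PySem.Str.strip line0
    if (line != "") && PySem.Str.isIn ":" line then
      let p := pyPartitionColon line
      acc ++ [(PySem.Str.upper (PySem.Str.strip p.1), PySem.Str.strip p.2)]
    else acc) []

-- next((v for k, v in pairs if k == t), "")
def mslB_first (pairs : List (String × String)) (t : String) : String :=
  match pairs.find? (fun p => p.1 == t) with
  | some p => p.2
  | none => ""

def merge_summary_lines_py_alt (raw : String) (tickers : List String) : List (String × String) :=
  let pairs := (mslB_parse raw).reverse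
  (tickers.foldl (fun d t => d.insert t (mslB_first pairs t)) PySem.Dict.empty).items

-- ===== PRECONDITION & SPEC =====
def Spec_merge_summary_lines_py (raw : String) (tickers : List String) (out : List (String × String)) : Prop := out = merge_summary_lines_py_alt raw tickers
instance (raw : String) (tickers : List String) (out : List (String × String)) : Decidable (Spec_merge_summary_lines_py raw tickers out) := by unfold Spec_merge_summary_lines_py; infer_instance

-- ===== CLAIM (what is proved, stated in full; the proofs are below) =====
def Claim_equal_merge_summary_lines_py : Prop := ∀ (raw : String) (tickers : List String), Dom_merge_summary_lines_py raw tickers → Spec_merge_summary_lines_py raw tickers (merge_summary_lines_py raw tickers)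

-- ===== LEMMAS AND PROOFS =====

-- canonical classifier of a raw line: none = skipped, some (key, value) otherwise
def parseLine (line0 : String) : Option (String × String) :=
  let line := PySem.Str.strip line0
  if (line != "") && PySem.Str.isIn ":" line then
    let p := pyPartitionColon line
    some (PySem.Str.upper (PySem.Str.strip p.1), PySem.Str.strip p.2)
  else none

-- the final value at key k after processing lines, starting from value v
def applyLines : List String → String → String → String
  | [], _, v => v
  | l :: ls, k, v =>
    match parseLine l with
    | some (t, w) => applyLines ls k (if k = t then w else v)
    | none => applyLines ls k v

lemma mslA_step_eq (out : PySem.Dict String String) (l : String) :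
    mslA_step out l = match parseLine l with
      | none => out
      | some (t, v) => if out.contains t then out.insert t v else out := by
  unfold mslA_step parseLine
  by_cases h1 : PySem.Str.strip l = ""
  · simp [h1]
  · by_cases h2 : PySem.Chars.isIn [':'] (PySem.Chars.strip l.toList)
    · simp [h1, h2]
    · simp [h1, h2]

-- A's fold over lines, started on a table of distinct keys, updates each key pointwise
lemma foldA_items (lines : List String) (ks : List String) (h : String → String) :
    lines.foldl mslA_step (PySem.Dict.mk (ks.map fun k => (k, h k))) =
      PySem.Dict.mk (ks.map fun k => (k, applyLines lines k (h k))) := by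
  induction lines generalizing h with
  | nil => simp [applyLines]
  | cons l ls ih =>
    cases hp : parseLine l with
    | none =>
      simp only [List.foldl_cons, mslA_step_eq, hp]
      rw [ih h]
      congr 1
      refine List.map_congr_left fun k hk => ?_
      simp [applyLines, hp]
    | some tv =>
      obtain ⟨t, v⟩ := tv
      simp only [List.foldl_cons, mslA_step_eq, hp]
      by_cases hmem : t ∈ ks
      · have hc : (PySem.Dict.mk (ks.map fun k => (k, h k))).contains t = true := by
          rw [PySem.Dict.contains_eq_decide_mem_keys]
          simp [PySem.Dict.keys, hmem]
        rw [if_pos hc]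
        have hins : (PySem.Dict.mk (ks.map fun k => (k, h k))).insert t v =
            PySem.Dict.mk (ks.map fun k => (k, if k = t then v else h k)) := by
          apply PySem.Dict.ext
          rw [PySem.Dict.items_insert_of_contains _ _ hc]
          simp only [List.map_map]
          refine List.map_congr_left fun k hk => ?_
          by_cases hkt : k = t <;> simp [hkt]
        rw [hins, ih _]
        congr 1
        refine List.map_congr_left fun k hk => ?_
        simp [applyLines, hp]
      · have hc : (PySem.Dict.mk (ks.map fun k => (k, h k))).contains t = false := by
          rw [PySem.Dict.contains_eq_decide_mem_keys]
          simp [PySem.Dict.keys, hmem]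
        rw [hc]
        simp only [Bool.false_eq_true, if_false]
        rw [ih h]
        congr 1
        refine List.map_congr_left fun k hk => ?_
        have hkt : k ≠ t := fun he => hmem (he ▸ hk)
        simp [applyLines, hp, hkt]

-- B's tokenising fold is the filterMap of parseLine
lemma mslB_step_eq (acc : List (String × String)) (l : String) :
    (let line := PySem.Str.strip l
     if (line != "") && PySem.Str.isIn ":" line then
       let p := pyPartitionColon line
       acc ++ [(PySem.Str.upper (PySem.Str.strip p.1), PySem.Str.strip p.2)]
     else acc) = acc ++ (parseLine l).toList := by
  unfold parseLine
  by_cases h1 : PySem.Str.strip l = ""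
  · simp [h1]
  · by_cases h2 : PySem.Chars.isIn [':'] (PySem.Chars.strip l.toList)
    · simp [h1, h2]
    · simp [h1, h2]

lemma mslB_foldl_eq (acc : List (String × String)) (ls : List String) :
    ls.foldl (fun acc line0 =>
      let line := PySem.Str.strip line0
      if (line != "") && PySem.Str.isIn ":" line then
        let p := pyPartitionColon line
        acc ++ [(PySem.Str.upper (PySem.Str.strip p.1), PySem.Str.strip p.2)]
      else acc) acc = acc ++ ls.filterMap parseLine := by
  induction ls generalizing acc with
  | nil => simp
  | cons l ls ih =>
    rw [List.foldl_cons]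
    show List.foldl _ (let line := PySem.Str.strip l
      if (line != "") && PySem.Str.isIn ":" line then
        let p := pyPartitionColon line
        acc ++ [(PySem.Str.upper (PySem.Str.strip p.1), PySem.Str.strip p.2)]
      else acc) ls = _
    rw [mslB_step_eq, ih]
    cases hp : parseLine l <;> simp [List.filterMap_cons, hp]

lemma mslB_parse_eq_filterMap (raw : String) :
    mslB_parse raw = (PySem.Str.splitlines raw).filterMap parseLine := by
  unfold mslB_parse
  simpa using mslB_foldl_eq [] (PySem.Str.splitlines raw)

-- first match over the reversed parsed list = last-wins accumulator
lemma first_rev_eq_applyLines (lines : List String) (k : String) (v : String) :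
    applyLines lines k v =
      match ((lines.filterMap parseLine).reverse.find? (fun p => p.1 == k)) with
      | some p => p.2
      | none => v := by
  induction lines generalizing v with
  | nil => simp [applyLines]
  | cons l ls ih =>
    cases hp : parseLine l with
    | none => simp [applyLines, hp, ih]
    | some tv =>
      obtain ⟨t, w⟩ := tv
      simp only [applyLines, hp, List.filterMap_cons, List.reverse_cons]
      rw [ih]
      rw [List.find?_append]
      cases hf : (ls.filterMap parseLine).reverse.find? (fun p => p.1 == k) with
      | some p => simp [hf]
      | none =>
        by_cases hkt : k = t
        · simp [hf, hkt]
        · have hb : ((t, w).1 == k) = false := by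
            simp [Ne.symm hkt]
          simp [hf, hb, hkt]

-- a fold of inserts with a value function of the key builds the dedup table
lemma foldl_insert_fun (xs : List String) (ks : List String) (f : String → String)
    (hnd : ks.Nodup) :
    xs.foldl (fun d t => d.insert t (f t)) (PySem.Dict.mk (ks.map fun k => (k, f k))) =
      PySem.Dict.mk ((PySem.Set.update ks xs).map fun k => (k, f k)) := by
  induction xs generalizing ks with
  | nil => simp [PySem.Set.update]
  | cons t xs ih =>
    rw [List.foldl_cons]
    by_cases hmem : t ∈ ks
    · have hc : (PySem.Dict.mk (ks.map fun k => (k, f k))).contains t = true := by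
        rw [PySem.Dict.contains_eq_decide_mem_keys]
        simp [PySem.Dict.keys, hmem]
      have hins : (PySem.Dict.mk (ks.map fun k => (k, f k))).insert t (f t) =
          PySem.Dict.mk (ks.map fun k => (k, f k)) := by
        apply PySem.Dict.ext
        rw [PySem.Dict.items_insert_of_contains _ _ hc, List.map_map]
        refine List.map_congr_left fun k hk => ?_
        by_cases hkt : k = t <;> simp [hkt]
      rw [hins, ih ks hnd]
      congr 2
      simp [PySem.Set.update, PySem.Set.add_of_mem hmem]
    · have hc : (PySem.Dict.mk (ks.map fun k => (k, f k))).contains t = false := by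
        rw [PySem.Dict.contains_eq_decide_mem_keys]
        simp [PySem.Dict.keys, hmem]
      have hins : (PySem.Dict.mk (ks.map fun k => (k, f k))).insert t (f t) =
          PySem.Dict.mk ((ks ++ [t]).map fun k => (k, f k)) := by
        apply PySem.Dict.ext
        rw [PySem.Dict.items_insert_of_not_contains _ _ hc]
        simp
      have hnd' : (ks ++ [t]).Nodup := by
        simp [List.nodup_append, hnd]
        exact fun a ha he => hmem (he ▸ ha)
      rw [hins, ih (ks ++ [t]) hnd']
      congr 2
      simp [PySem.Set.update, PySem.Set.add_of_not_mem hmem]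

-- corollary of foldl_insert_fun for the empty initial dict
lemma foldl_insert_fun_empty (xs : List String) (f : String → String) :
    xs.foldl (fun d t => d.insert t (f t)) PySem.Dict.empty =
      PySem.Dict.mk ((PySem.Set.ofList xs).map fun k => (k, f k)) := by
  have h := foldl_insert_fun xs [] f List.nodup_nil
  have hu : PySem.Set.update ([] : PySem.Set String) xs = PySem.Set.ofList xs := rfl
  rw [hu] at h
  simpa using h

-- ===== VERDICT (by name: the statement is the Claim_ definition above) =====
theorem merge_summary_lines_py_spec : Claim_equal_merge_summary_lines_py := by
  intro raw tickers _
  unfold Spec_merge_summary_lines_py merge_summary_lines_py merge_summary_lines_py_alt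
  dsimp only
  rw [foldl_insert_fun_empty tickers (fun _ => ""),
      foldl_insert_fun_empty tickers (fun t => mslB_first ((mslB_parse raw).reverse) t),
      foldA_items _ _ _]
  dsimp only
  refine List.map_congr_left fun k hk => ?_
  rw [first_rev_eq_applyLines, mslB_first, mslB_parse_eq_filterMap]
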